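-- pv_equiv track=rewrite | github.com/every-algorithm/python | scheduling/look_algorithm.py | look_algorithm
-- ===== SOURCE A (Python) =====
-- def look_algorithm(requests, head_start, direction='up'):
--     """
--     requests: list of cylinder numbers to service
--     head_start: starting cylinder position of the disk head
--     direction: 'up' for increasing cylinder numbers, 'down' for decreasing
--     Returns a list of serviced cylinder order.
--     """
--     # Ensure a copy of requests to avoid modifying caller's list
--     pending = sorted(requests)
--     schedule = []
--     current = head_start
--
--     while pending:
--         if direction == 'up':
--             # Find the first request greater than or equal to current
--             next_req = None
--             for req in pending:
--                 if req >= current: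
--                     next_req = req
--                     break
--             if next_req is None:
--                 # No more requests in this direction; reverse direction
--                 direction = 'down'
--                 continue
--             current = next_req
--             schedule.append(current)
--             pending.remove(current)
--         else:  # direction == 'down'
--             # Find the first request less than or equal to current
--             next_req = None
--             for req in reversed(pending):
--                 if req <= current:
--                     next_req = req
--                     break
--             if next_req is None:
--                 # No more requests in this direction; reverse direction
--                 direction = 'up'
--                 continue
--             current = next_req
--             schedule.append(current)
--             pending.remove(current)
--
--     return schedule
-- ===== SOURCE B (Python) =====
-- def look_algorithm(requests, head_start, direction='up'):
--     """
--     requests: list of cylinder numbers to service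
--     head_start: starting cylinder position of the disk head
--     direction: 'up' for increasing cylinder numbers, 'down' for decreasing
--     Returns a list of serviced cylinder order.
--     """
--     s = sorted(requests)
--     if direction == 'up':
--         up = [r for r in s if r >= head_start]
--         down = [r for r in s if r < head_start]
--         return up + list(reversed(down))
--     else:
--         down = [r for r in s if r <= head_start]
--         up = [r for r in s if r > head_start]
--         return list(reversed(down)) + up
-- ===== Notes on version B (the rewrite author's own statement) =====
-- stated objective: faster
-- what changed: B replaces A's O(n^2) while-loop (which rescans and remove()s from the pending list once per serviced request) by a single sort followed by a partition at head_start, concatenating the ascending up-run with the reversed down-run.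
import Mathlib
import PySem

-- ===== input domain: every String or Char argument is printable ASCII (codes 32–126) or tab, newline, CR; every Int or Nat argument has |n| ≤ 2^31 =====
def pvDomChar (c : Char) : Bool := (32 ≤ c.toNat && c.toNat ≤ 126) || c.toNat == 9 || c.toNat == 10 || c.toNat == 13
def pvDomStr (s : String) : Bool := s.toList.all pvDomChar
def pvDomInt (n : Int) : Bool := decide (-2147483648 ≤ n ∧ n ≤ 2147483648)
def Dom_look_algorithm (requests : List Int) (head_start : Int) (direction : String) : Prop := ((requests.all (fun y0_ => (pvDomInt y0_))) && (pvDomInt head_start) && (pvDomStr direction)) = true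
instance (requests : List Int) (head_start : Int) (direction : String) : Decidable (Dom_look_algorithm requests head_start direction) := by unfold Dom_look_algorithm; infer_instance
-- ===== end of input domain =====

-- B replaces A's remove-one-request-per-scan loop by: sort once, partition at head_start,
-- and concatenate the two runs (up-run ascending, down-run descending) — asymptotically faster.

-- ===== PORT A =====
-- The while loop of A, with a fuel parameter as a totality guard only:
-- 2*|pending|+2 steps always suffice (each iteration removes a request or flips
-- the direction, and a flip is immediately followed by removals; proved below).
def lookLoop : Nat → List Int → List Int → Int → String → List Int
  | 0, _, schedule, _, _ => schedule
  | fuel+1, pending, schedule, current, direction =>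
    if pending = [] then schedule
    else if direction = "up" then
      match pending.find? (fun req => decide (req ≥ current)) with
      | none => lookLoop fuel pending schedule current "down"
      | some r => lookLoop fuel ((PySem.List.remove? pending r).getD pending) (schedule ++ [r]) r direction
    else
      match pending.reverse.find? (fun req => decide (req ≤ current)) with
      | none => lookLoop fuel pending schedule current "up"
      | some r => lookLoop fuel ((PySem.List.remove? pending r).getD pending) (schedule ++ [r]) r direction

def look_algorithm (requests : List Int) (head_start : Int) (direction : String) : List Int :=
  let pending := PySem.List.sorted requests (fun x => x) false
  lookLoop (2 * pending.length + 2) pending [] head_start direction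

-- ===== PORT B =====
def look_algorithm_alt (requests : List Int) (head_start : Int) (direction : String) : List Int :=
  let s := PySem.List.sorted requests (fun x => x) false
  if direction = "up" then
    s.filter (fun r => decide (r ≥ head_start)) ++ (s.filter (fun r => decide (r < head_start))).reverse
  else
    (s.filter (fun r => decide (r ≤ head_start))).reverse ++ s.filter (fun r => decide (r > head_start))

-- ===== PRECONDITION & SPEC =====
def Spec_look_algorithm (requests : List Int) (head_start : Int) (direction : String) (out : List Int) : Prop := out = look_algorithm_alt requests head_start direction
instance (requests : List Int) (head_start : Int) (direction : String) (out : List Int) : Decidable (Spec_look_algorithm requests head_start direction out) := by unfold Spec_look_algorithm; infer_instance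

-- ===== CLAIM (what is proved, stated in full; the proofs are below) =====
def Claim_equal_look_algorithm : Prop := ∀ (requests : List Int) (head_start : Int) (direction : String), Dom_look_algorithm requests head_start direction → Spec_look_algorithm requests head_start direction (look_algorithm requests head_start direction)

-- ===== LEMMAS AND PROOFS =====

-- All elements of t equal a → t ++ [a] = a :: t.
lemma append_singleton_of_all_eq (a : Int) (t : List Int) (h : ∀ x ∈ t, x = a) :
    t ++ [a] = a :: t := by
  induction t with
  | nil => rfl
  | cons b t ih =>
    have hb : b = a := h b (by simp)
    have := ih (fun x hx => h x (by simp [hx]))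
    simp [hb] at this ⊢
    exact this

-- On a sorted list bounded by m, erasing m from l ++ [m] gives back l.
lemma erase_append_last (l : List Int) (m : Int)
    (hs : l.Pairwise (· ≤ ·)) (hm : ∀ x ∈ l, x ≤ m) :
    (l ++ [m]).erase m = l := by
  induction l with
  | nil => simp
  | cons a t ih =>
    by_cases ha : a = m
    · subst ha
      have hall : ∀ x ∈ t, x = a := by
        intro x hx
        have h1 : a ≤ x := (List.pairwise_cons.mp hs).1 x hx
        have h2 : x ≤ a := hm x (by simp [hx])
        omega
      simp only [List.cons_append, List.erase_cons_head]
      exact append_singleton_of_all_eq a t hall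
    · have hbeq : (a == m) = false := by simp [ha]
      simp only [List.cons_append, List.erase_cons, hbeq, Bool.false_eq_true, if_false]
      rw [ih (List.pairwise_cons.mp hs).2 (fun x hx => hm x (by simp [hx]))]

-- Up phase with nothing below: every request is ≥ current, so they are serviced in order.
lemma lookLoop_up_all_ge (fuel : Nat) (l sch : List Int) (c : Int)
    (hs : l.Pairwise (· ≤ ·)) (hall : ∀ x ∈ l, c ≤ x) (hf : l.length ≤ fuel) :
    lookLoop fuel l sch c "up" = sch ++ l := by
  induction l generalizing fuel sch c with
  | nil => cases fuel <;> simp [lookLoop]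
  | cons a t ih =>
    obtain ⟨f, rfl⟩ : ∃ f, fuel = f + 1 := ⟨fuel - 1, by simp at hf; omega⟩
    have hfind : (a :: t).find? (fun req => decide (req ≥ c)) = some a :=
      List.find?_cons_of_pos (by simpa using hall a (by simp))
    simp only [lookLoop, if_neg (by simp : ¬(a :: t = [])), reduceIte,
      hfind, PySem.List.remove?_cons_self, Option.getD_some]
    rw [ih f (sch ++ [a]) a (List.pairwise_cons.mp hs).2
      (fun x hx => (List.pairwise_cons.mp hs).1 x hx) (by simp at hf ⊢; omega)]
    simp

-- Down phase with nothing above: every request is ≤ current, serviced in reverse order.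
lemma lookLoop_down_all_le (fuel : Nat) (l sch : List Int) (c : Int) (d : String)
    (hd : d ≠ "up")
    (hs : l.Pairwise (· ≤ ·)) (hall : ∀ x ∈ l, x ≤ c) (hf : l.length ≤ fuel) :
    lookLoop fuel l sch c d = sch ++ l.reverse := by
  induction l using List.reverseRecOn generalizing fuel sch c with
  | nil => cases fuel <;> simp [lookLoop]
  | append_singleton t m ih =>
    obtain ⟨f, rfl⟩ : ∃ f, fuel = f + 1 := ⟨fuel - 1, by simp at hf; omega⟩
    have hm : m ≤ c := hall m (by simp)
    have hfind : (m :: t.reverse).find? (fun req => decide (req ≤ c)) = some m :=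
      List.find?_cons_of_pos (by simpa using hm)
    have ht : ∀ x ∈ t, x ≤ m := by
      intro x hx
      have := List.pairwise_append.mp hs
      exact this.2.2 x hx m (by simp)
    have hts : t.Pairwise (· ≤ ·) := (List.pairwise_append.mp hs).1
    have hrev : (t ++ [m]).reverse = m :: t.reverse := by simp
    have hmem : m ∈ t ++ [m] := by simp
    simp only [lookLoop, if_neg (by simp : ¬(t ++ [m] = [])), if_neg hd,
      hrev, hfind,
      PySem.List.remove?_eq_some_erase _ _ hmem, Option.getD_some,
      erase_append_last t m hts ht]
    rw [ih f (sch ++ [m]) m hts ht (by simp at hf ⊢; omega)]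
    simp

-- Full up run: serve everything ≥ c ascending, then everything < c descending.
lemma lookLoop_up (fuel : Nat) (l sch : List Int) (c : Int)
    (hs : l.Pairwise (· ≤ ·)) (hf : 2 * l.length + 1 ≤ fuel) :
    lookLoop fuel l sch c "up" =
      sch ++ l.filter (fun r => decide (r ≥ c)) ++ (l.filter (fun r => decide (r < c))).reverse := by
  induction fuel generalizing l sch c with
  | zero => omega
  | succ f ih =>
    by_cases hl : l = []
    · subst hl; simp [lookLoop]
    · simp only [lookLoop, if_neg hl]
      rcases hfind : l.find? (fun req => decide (req ≥ c)) with _ | m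
      · -- nothing ≥ c: flip to "down"; everything is < c
        have hall : ∀ x ∈ l, x < c := by
          intro x hx
          have := List.find?_eq_none.mp hfind x hx
          simpa using this
        simp only [reduceIte]
        rw [lookLoop_down_all_le f l sch c "down" (by decide) hs
          (fun x hx => le_of_lt (hall x hx)) (by omega)]
        have h1 : l.filter (fun r => decide (r ≥ c)) = [] := by
          simp only [List.filter_eq_nil_iff]; intro x hx; simpa using not_le.mpr (hall x hx)
        have h2 : l.filter (fun r => decide (r < c)) = l := by
          simp only [List.filter_eq_self]; intro x hx; simpa using hall x hx
        simp [h1, h2]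
      · -- first request ≥ c is m: service it, stay "up"
        simp only [reduceIte]
        obtain ⟨hpm, l1, l2, rfl, hl1⟩ := List.find?_eq_some_iff_append.mp hfind
        have hcm : c ≤ m := by simpa using hpm
        have hl1lt : ∀ x ∈ l1, x < c := by
          intro x hx; have := hl1 x hx; simp at this; omega
        have hml2 : (m :: l2).Pairwise (· ≤ ·) := (List.pairwise_append.mp hs).2.1
        have hl2ge : ∀ x ∈ l2, m ≤ x := (List.pairwise_cons.mp hml2).1
        have hmem : m ∈ l1 ++ m :: l2 := by simp
        have hml1 : m ∉ l1 := fun h => absurd hcm (not_le.mpr (hl1lt m h))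
        have herase : (l1 ++ m :: l2).erase m = l1 ++ l2 := by
          rw [List.erase_append_right _ hml1, List.erase_cons_head]
        simp only [PySem.List.remove?_eq_some_erase _ _ hmem, Option.getD_some, herase]
        have hsub : (l1 ++ l2).Sublist (l1 ++ m :: l2) :=
          List.Sublist.append (List.Sublist.refl l1) (List.sublist_cons_self m l2)
        rw [ih (l1 ++ l2) (sch ++ [m]) m (hs.sublist hsub) (by simp at hf ⊢; omega)]
        have f1 : (l1 ++ l2).filter (fun r => decide (r ≥ m)) = l2 := by
          rw [List.filter_append]
          have e1 : l1.filter (fun r => decide (r ≥ m)) = [] := by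
            simp only [List.filter_eq_nil_iff]; intro x hx
            have := hl1lt x hx; simp; omega
          have e2 : l2.filter (fun r => decide (r ≥ m)) = l2 := by
            simp only [List.filter_eq_self]; intro x hx; simpa using hl2ge x hx
          simp [e1, e2]
        have f2 : (l1 ++ l2).filter (fun r => decide (r < m)) = l1 := by
          rw [List.filter_append]
          have e1 : l1.filter (fun r => decide (r < m)) = l1 := by
            simp only [List.filter_eq_self]; intro x hx
            have := hl1lt x hx; simp; omega
          have e2 : l2.filter (fun r => decide (r < m)) = [] := by
            simp only [List.filter_eq_nil_iff]; intro x hx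
            have := hl2ge x hx; simp; omega
          simp [e1, e2]
        have g1 : (l1 ++ m :: l2).filter (fun r => decide (r ≥ c)) = m :: l2 := by
          rw [List.filter_append]
          have e1 : l1.filter (fun r => decide (r ≥ c)) = [] := by
            simp only [List.filter_eq_nil_iff]; intro x hx
            have := hl1lt x hx; simp; omega
          have e2 : (m :: l2).filter (fun r => decide (r ≥ c)) = m :: l2 := by
            simp only [List.filter_eq_self]; intro x hx
            rcases List.mem_cons.mp hx with rfl | hx
            · simpa using hcm
            · have := hl2ge x hx; simp; omega
          simp [e1, e2]
        have g2 : (l1 ++ m :: l2).filter (fun r => decide (r < c)) = l1 := by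
          rw [List.filter_append]
          have e1 : l1.filter (fun r => decide (r < c)) = l1 := by
            simp only [List.filter_eq_self]; intro x hx; simpa using hl1lt x hx
          have e2 : (m :: l2).filter (fun r => decide (r < c)) = [] := by
            simp only [List.filter_eq_nil_iff]; intro x hx
            rcases List.mem_cons.mp hx with rfl | hx
            · simp; omega
            · have := hl2ge x hx; simp; omega
          simp [e1, e2]
        rw [f1, f2, g1, g2]
        simp

-- Full down run: serve everything ≤ c descending, then everything > c ascending.
lemma lookLoop_down (fuel : Nat) (l sch : List Int) (c : Int) (d : String)
    (hd : d ≠ "up")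
    (hs : l.Pairwise (· ≤ ·)) (hf : 2 * l.length + 1 ≤ fuel) :
    lookLoop fuel l sch c d =
      sch ++ (l.filter (fun r => decide (r ≤ c))).reverse ++ l.filter (fun r => decide (r > c)) := by
  induction fuel generalizing l sch c with
  | zero => omega
  | succ f ih =>
    by_cases hl : l = []
    · subst hl; simp [lookLoop]
    · simp only [lookLoop, if_neg hl, if_neg hd]
      rcases hfind : l.reverse.find? (fun req => decide (req ≤ c)) with _ | m
      · -- nothing ≤ c: flip to "up"; everything is > c
        have hall : ∀ x ∈ l, c < x := by
          intro x hx
          have := List.find?_eq_none.mp hfind x (by simpa using hx)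
          simpa using this
        rw [lookLoop_up_all_ge f l sch c hs
          (fun x hx => le_of_lt (hall x hx)) (by omega)]
        have h1 : l.filter (fun r => decide (r ≤ c)) = [] := by
          simp only [List.filter_eq_nil_iff]; intro x hx
          have := hall x hx; simp; omega
        have h2 : l.filter (fun r => decide (r > c)) = l := by
          simp only [List.filter_eq_self]; intro x hx; simpa using hall x hx
        simp [h1, h2]
      · -- last request ≤ c is m: service it, keep going down
        obtain ⟨hpm, r1, r2, hsplit, hr1⟩ := List.find?_eq_some_iff_append.mp hfind
        have hmc : m ≤ c := by simpa using hpm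
        have hleq : l = r2.reverse ++ [m] ++ r1.reverse := by
          have := congrArg List.reverse hsplit
          simpa using this
        subst hleq
        have hR : ∀ x ∈ r1.reverse, c < x := by
          intro x hx
          have := hr1 x (by simpa using hx); simp at this; omega
        have hLm : (r2.reverse ++ [m]).Pairwise (· ≤ ·) :=
          (List.pairwise_append.mp (by simpa using hs)).1
        have hL : ∀ x ∈ r2.reverse, x ≤ m := by
          intro x hx
          exact (List.pairwise_append.mp hLm).2.2 x hx m (by simp)
        have hLs : r2.reverse.Pairwise (· ≤ ·) := (List.pairwise_append.mp hLm).1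
        have hmem : m ∈ r2.reverse ++ [m] ++ r1.reverse := by simp
        have herase : (r2.reverse ++ [m] ++ r1.reverse).erase m = r2.reverse ++ r1.reverse := by
          rw [List.erase_append_left _ (by simp : m ∈ r2.reverse ++ [m]),
            erase_append_last r2.reverse m hLs hL]
        simp only [PySem.List.remove?_eq_some_erase _ _ hmem, Option.getD_some, herase]
        have hsub : (r2.reverse ++ r1.reverse).Sublist (r2.reverse ++ [m] ++ r1.reverse) := by
          rw [List.append_assoc]
          exact List.Sublist.append (List.Sublist.refl r2.reverse)
            (List.sublist_append_right _ _ |>.trans (List.Sublist.refl _))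
        rw [ih (r2.reverse ++ r1.reverse) (sch ++ [m]) m (hs.sublist hsub)
          (by simp at hf ⊢; omega)]
        have f1 : (r2.reverse ++ r1.reverse).filter (fun r => decide (r ≤ m)) = r2.reverse := by
          rw [List.filter_append]
          have e1 : r2.reverse.filter (fun r => decide (r ≤ m)) = r2.reverse := by
            simp only [List.filter_eq_self]; intro x hx; simpa using hL x hx
          have e2 : r1.reverse.filter (fun r => decide (r ≤ m)) = [] := by
            simp only [List.filter_eq_nil_iff]; intro x hx
            have := hR x hx; simp; omega
          simp [e1, e2]
        have f2 : (r2.reverse ++ r1.reverse).filter (fun r => decide (r > m)) = r1.reverse := by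
          rw [List.filter_append]
          have e1 : r2.reverse.filter (fun r => decide (r > m)) = [] := by
            simp only [List.filter_eq_nil_iff]; intro x hx
            have := hL x hx; simp; omega
          have e2 : r1.reverse.filter (fun r => decide (r > m)) = r1.reverse := by
            simp only [List.filter_eq_self]; intro x hx
            have := hR x hx; simp; omega
          simp [e1, e2]
        have g1 : (r2.reverse ++ [m] ++ r1.reverse).filter (fun r => decide (r ≤ c)) = r2.reverse ++ [m] := by
          rw [List.filter_append, List.filter_append]
          have e1 : r2.reverse.filter (fun r => decide (r ≤ c)) = r2.reverse := by
            simp only [List.filter_eq_self]; intro x hx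
            have := hL x hx; simp; omega
          have e2 : [m].filter (fun r => decide (r ≤ c)) = [m] := by simp; omega
          have e3 : r1.reverse.filter (fun r => decide (r ≤ c)) = [] := by
            simp only [List.filter_eq_nil_iff]; intro x hx
            have := hR x hx; simp; omega
          simp [e1, e2, e3]
        have g2 : (r2.reverse ++ [m] ++ r1.reverse).filter (fun r => decide (r > c)) = r1.reverse := by
          rw [List.filter_append, List.filter_append]
          have e1 : r2.reverse.filter (fun r => decide (r > c)) = [] := by
            simp only [List.filter_eq_nil_iff]; intro x hx
            have := hL x hx; simp; omega
          have e2 : [m].filter (fun r => decide (r > c)) = [] := by simp; omega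
          have e3 : r1.reverse.filter (fun r => decide (r > c)) = r1.reverse := by
            simp only [List.filter_eq_self]; intro x hx
            have := hR x hx; simp; omega
          simp [e1, e2, e3]
        rw [f1, f2, g1, g2]
        simp

-- ===== VERDICT (by name: the statement is the Claim_ definition above) =====
theorem look_algorithm_spec : Claim_equal_look_algorithm := by
  intro requests head_start direction _
  have hp : (PySem.List.sorted requests (fun x : Int => x) false).Pairwise (· ≤ ·) := by
    simpa using PySem.List.sorted_pairwise requests (fun x : Int => x)
  unfold Spec_look_algorithm look_algorithm look_algorithm_alt
  by_cases hdir : direction = "up"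
  · subst hdir
    simp only [reduceIte]
    rw [lookLoop_up _ _ _ _ hp (by omega)]
    simp
  · simp only [if_neg hdir]
    rw [lookLoop_down _ _ _ _ _ hdir hp (by omega)]
    simp
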